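-- pv_equiv track=rewrite | github.com/jendastovik/unit-1 | Lessons/lesson2.py | ipmachine1
-- ===== SOURCE A (Python) =====
-- def ipmachine1(x):
--     ips  = []
--     for a in range(x+1):
--         for b in range(x+1):
--             for c in range(x+1):
--                 for d in range(x+1):
--                     ips.append(f"{a}.{b}.{c}.{d}")
--     return ips
-- ===== SOURCE B (Python) =====
-- def ipmachine1(x):
--     r = x + 1
--     total = r ** 4 if r > 0 else 0
--     ips = []
--     for n in range(total):
--         a = n // (r * r * r)
--         b = (n // (r * r)) % r
--         c = (n // r) % r
--         d = n % r
--         ips.append(f"{a}.{b}.{c}.{d}")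
--     return ips
-- ===== Notes on version B (the rewrite author's own statement) =====
-- stated objective: alternative
-- what changed: Replaces the four nested range loops with a single flat loop over all combination indices, decoding the four octets by mixed-radix division/modulo arithmetic.
import Mathlib
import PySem

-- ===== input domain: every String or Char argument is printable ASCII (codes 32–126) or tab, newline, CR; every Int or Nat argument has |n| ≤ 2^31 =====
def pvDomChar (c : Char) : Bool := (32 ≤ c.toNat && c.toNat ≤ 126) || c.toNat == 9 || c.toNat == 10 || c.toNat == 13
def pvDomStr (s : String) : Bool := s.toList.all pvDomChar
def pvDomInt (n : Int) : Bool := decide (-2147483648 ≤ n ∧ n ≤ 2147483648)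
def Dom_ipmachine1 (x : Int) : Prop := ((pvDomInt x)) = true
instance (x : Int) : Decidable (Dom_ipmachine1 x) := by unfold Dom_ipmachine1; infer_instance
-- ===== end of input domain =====

-- B replaces the four nested range loops by one flat loop over (x+1)^4 indices with
-- mixed-radix division/modulo decoding of the four octets (alternative decomposition).

-- f"{a}.{b}.{c}.{d}"  (shared formatting helper, used verbatim by both ports)
def pvFmtIp (a b c d : Int) : String :=
  PySem.Int.toStr a ++ "." ++ PySem.Int.toStr b ++ "." ++ PySem.Int.toStr c ++ "." ++ PySem.Int.toStr d

-- ===== PORT A =====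
def ipmachine1 (x : Int) : List String :=
  (PySem.List.pyRange 0 (x+1) 1).foldl (fun ips a =>
    (PySem.List.pyRange 0 (x+1) 1).foldl (fun ips b =>
      (PySem.List.pyRange 0 (x+1) 1).foldl (fun ips c =>
        (PySem.List.pyRange 0 (x+1) 1).foldl (fun ips d =>
          ips ++ [pvFmtIp a b c d]) ips) ips) ips) []

-- ===== PORT B =====
def ipmachine1_alt (x : Int) : List String :=
  let r := x + 1
  let total := if r > 0 then r ^ 4 else 0
  (PySem.List.pyRange 0 total 1).foldl (fun ips n =>
    ips ++ [pvFmtIp (PySem.Int.floordiv n (r*r*r))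
                    (PySem.Int.mod (PySem.Int.floordiv n (r*r)) r)
                    (PySem.Int.mod (PySem.Int.floordiv n r) r)
                    (PySem.Int.mod n r)]) []

-- ===== PRECONDITION & SPEC =====
def Spec_ipmachine1 (x : Int) (out : List String) : Prop := out = ipmachine1_alt x
instance (x : Int) (out : List String) : Decidable (Spec_ipmachine1 x out) := by unfold Spec_ipmachine1; infer_instance

-- ===== CLAIM (what is proved, stated in full; the proofs are below) =====
def Claim_equal_ipmachine1 : Prop := ∀ (x : Int), Dom_ipmachine1 x → Spec_ipmachine1 x (ipmachine1 x)

-- ===== LEMMAS AND PROOFS =====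

-- range(a, a+r) is range(0, r) shifted by a
lemma pvRange_shift (a r : Int) :
    PySem.List.pyRange a (a + r) 1 = (PySem.List.pyRange 0 r 1).map (fun b => a + b) := by
  simp [PySem.List.pyRange_one, List.map_map, Function.comp]

-- splitting a flat range(0, k*r) scan into an outer k-scan and an inner r-scan
lemma pvFlatMap_range_mul {α : Type} (r : Int) (hr : 0 < r) (k : Int) (hk : 0 ≤ k)
    (h : Int → List α) :
    (PySem.List.pyRange 0 (k * r) 1).flatMap h
      = (PySem.List.pyRange 0 k 1).flatMap
          (fun a => (PySem.List.pyRange 0 r 1).flatMap (fun b => h (a * r + b))) := by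
  obtain ⟨m, rfl⟩ := Int.eq_ofNat_of_zero_le hk
  induction m with
  | zero => simp
  | succ m ih =>
      have h1 : ((m + 1 : Nat) : Int) * r = (m : Int) * r + r := by push_cast; ring
      have h2 : PySem.List.pyRange 0 (((m + 1 : Nat) : Int) * r) 1
          = PySem.List.pyRange 0 ((m : Int) * r) 1 ++ PySem.List.pyRange ((m:Int)*r) ((m:Int)*r + r) 1 := by
        rw [h1]
        exact PySem.List.pyRange_one_append 0 ((m:Int)*r) ((m:Int)*r + r)
          (by positivity) (by linarith)
      have h3 : PySem.List.pyRange 0 (((m:Nat):Int) + 1) 1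
          = PySem.List.pyRange 0 ((m:Nat):Int) 1 ++ [((m:Nat):Int)] :=
        PySem.List.pyRange_one_succ_right (by positivity)
      rw [h2, List.flatMap_append, ih (by positivity)]
      have h4 : ((m + 1 : Nat) : Int) = ((m : Nat) : Int) + 1 := by push_cast; ring
      rw [h4, h3, List.flatMap_append, pvRange_shift ((m:Int)*r) r]
      simp [List.flatMap_map]

-- the four digit-extraction identities
lemma pvDigits (r a b c d : Int) (hr : 0 < r)
    (hb1 : 0 ≤ b) (hb2 : b < r) (hc1 : 0 ≤ c) (hc2 : c < r)
    (hd1 : 0 ≤ d) (hd2 : d < r) :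
    PySem.Int.floordiv (((a*r+b)*r+c)*r+d) (r*r*r) = a ∧
    PySem.Int.mod (PySem.Int.floordiv (((a*r+b)*r+c)*r+d) (r*r)) r = b ∧
    PySem.Int.mod (PySem.Int.floordiv (((a*r+b)*r+c)*r+d) r) r = c ∧
    PySem.Int.mod (((a*r+b)*r+c)*r+d) r = d := by
  have hrr : (0:Int) < r * r := by positivity
  have hrrr : (0:Int) < r * r * r := by positivity
  have e1 : (((a*r+b)*r+c)*r+d) / r = (a*r+b)*r+c := by
    rw [show ((a*r+b)*r+c)*r+d = d + ((a*r+b)*r+c) * r by ring]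
    rw [Int.add_mul_ediv_right _ _ (by omega : r ≠ 0), Int.ediv_eq_zero_of_lt hd1 hd2]
    ring
  have e2 : (((a*r+b)*r+c)*r+d) / (r*r) = a*r+b := by
    rw [← Int.ediv_ediv_of_nonneg (le_of_lt hr), e1]
    rw [show (a*r+b)*r+c = c + (a*r+b) * r by ring]
    rw [Int.add_mul_ediv_right _ _ (by omega : r ≠ 0), Int.ediv_eq_zero_of_lt hc1 hc2]
    ring
  have e3 : (((a*r+b)*r+c)*r+d) / (r*r*r) = a := by
    rw [show r*r*r = (r*r)*r by ring, ← Int.ediv_ediv_of_nonneg (by positivity : (0:Int) ≤ r*r), e2]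
    rw [show a*r+b = b + a * r by ring]
    rw [Int.add_mul_ediv_right _ _ (by omega : r ≠ 0), Int.ediv_eq_zero_of_lt hb1 hb2]
    ring
  refine ⟨?_, ?_, ?_, ?_⟩
  · rw [PySem.Int.floordiv_eq_ediv_of_pos hrrr]; exact e3
  · rw [PySem.Int.floordiv_eq_ediv_of_pos hrr, PySem.Int.mod_eq_emod_of_pos hr, e2]
    simp [Int.emod_eq_of_lt hb1 hb2]
  · rw [PySem.Int.floordiv_eq_ediv_of_pos hr, PySem.Int.mod_eq_emod_of_pos hr, e1]
    simp [Int.emod_eq_of_lt hc1 hc2]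
  · rw [PySem.Int.mod_eq_emod_of_pos hr]
    rw [show ((a*r+b)*r+c)*r+d = d + ((a*r+b)*r+c) * r by ring]
    simp [Int.emod_eq_of_lt hd1 hd2]

-- main equality
lemma pvMain (x : Int) : ipmachine1 x = ipmachine1_alt x := by
  by_cases hr : 0 < x + 1
  case neg =>
    simp only [ipmachine1, ipmachine1_alt]
    rw [PySem.List.pyRange_one_eq_nil (by omega : x + 1 ≤ 0), if_neg hr,
      PySem.List.pyRange_one_eq_nil (by omega : (0:Int) ≤ 0)]
    simp
  case pos =>
    set r : Int := x + 1 with hrdef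
    have hA : ipmachine1 x =
        (PySem.List.pyRange 0 r 1).flatMap (fun a =>
          (PySem.List.pyRange 0 r 1).flatMap (fun b =>
            (PySem.List.pyRange 0 r 1).flatMap (fun c =>
              (PySem.List.pyRange 0 r 1).map (fun d => pvFmtIp a b c d)))) := by
      simp only [ipmachine1, PySem.List.foldl_append_singleton_eq_map,
        PySem.List.foldl_append_eq_flatMap, List.nil_append, ← hrdef]
    have hB : ipmachine1_alt x =
        (PySem.List.pyRange 0 (r*r*r*r) 1).flatMap (fun n =>
          [pvFmtIp (PySem.Int.floordiv n (r*r*r))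
                   (PySem.Int.mod (PySem.Int.floordiv n (r*r)) r)
                   (PySem.Int.mod (PySem.Int.floordiv n r) r)
                   (PySem.Int.mod n r)]) := by
      simp only [ipmachine1_alt, ← hrdef, if_pos hr,
        PySem.List.foldl_append_singleton_eq_map, List.map_eq_flatMap, List.nil_append]
      rw [show r ^ 4 = r*r*r*r by ring]
    rw [hA, hB]
    rw [pvFlatMap_range_mul r hr (r*r*r) (by positivity)]
    rw [pvFlatMap_range_mul r hr (r*r) (by positivity)]
    rw [pvFlatMap_range_mul r hr r (by omega)]
    refine List.flatMap_congr fun a _ => ?_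
    refine List.flatMap_congr fun b hb => ?_
    refine List.flatMap_congr fun c hc => ?_
    rw [List.map_eq_flatMap]
    refine List.flatMap_congr fun d hd => ?_
    rw [PySem.List.mem_pyRange_one] at hb hc hd
    obtain ⟨hb1, hb2⟩ := hb
    obtain ⟨hc1, hc2⟩ := hc
    obtain ⟨hd1, hd2⟩ := hd
    obtain ⟨g1, g2, g3, g4⟩ := pvDigits r a b c d hr hb1 hb2 hc1 hc2 hd1 hd2
    rw [g1, g2, g3, g4]

-- ===== VERDICT (by name: the statement is the Claim_ definition above) =====
theorem ipmachine1_spec : Claim_equal_ipmachine1 := by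
  intro x _
  unfold Spec_ipmachine1
  exact pvMain x
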